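-- pv_equiv track=rewrite | github.com/balart40/code-practice | python/1304_Find_N_Unique_Integers_Sum_up_to_Zero/solution_1304_Find_N_Unique_Integers_Sum_up_to_Zero.py | sumZero
-- ===== SOURCE A (Python) =====
-- def sumZero(n):
--     """
--     :type n: int
--     :rtype: List[int]
--     """
--     result =  []
--     start = 0
--     if n == 1:
--         result.append(0)
--         return result
--
--     if n % 2 != 0:
--         result.append(0)
--
--     start = 1
--     while len(result) < n:
--         result.insert(0, -1 * start)
--         result.append(start)
--         start += 1
--     return result
-- ===== SOURCE B (Python) =====
-- def sumZero(n):
--     k = n // 2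
--     mid = [0] if n % 2 != 0 else []
--     return list(range(-k, 0)) + mid + list(range(1, k + 1))
-- ===== Notes on version B (the rewrite author's own statement) =====
-- stated objective: faster
-- what changed: Replaces the quadratic front-insert/append loop with a direct one-pass construction from two ranges around an optional zero.
import Mathlib
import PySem

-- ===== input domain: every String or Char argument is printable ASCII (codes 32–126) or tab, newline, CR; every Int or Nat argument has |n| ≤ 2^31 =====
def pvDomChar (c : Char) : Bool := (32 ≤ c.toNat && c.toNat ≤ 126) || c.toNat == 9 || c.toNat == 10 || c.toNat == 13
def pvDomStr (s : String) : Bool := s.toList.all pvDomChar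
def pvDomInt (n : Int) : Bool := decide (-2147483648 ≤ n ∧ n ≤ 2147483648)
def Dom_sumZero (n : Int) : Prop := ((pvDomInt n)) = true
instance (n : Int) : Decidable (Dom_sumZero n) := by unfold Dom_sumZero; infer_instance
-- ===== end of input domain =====

-- B replaces A's quadratic front-insert/append loop with a direct one-pass construction
-- from two ranges around an optional zero (objective: faster).

-- ===== PORT A =====
-- A's while loop: insert -start at the front, append start at the back, until len(result) ≥ n.
def sumZeroLoop (n : Int) (start : Int) (result : List Int) : List Int :=
  if (result.length : Int) < n then
    sumZeroLoop n (start + 1) (((-1) * start :: result) ++ [start])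
  else result
termination_by (n - result.length).toNat
decreasing_by simp; omega

def sumZero (n : Int) : List Int :=
  if n == 1 then [0]
  else
    let result : List Int := if PySem.Int.mod n 2 ≠ 0 then [0] else []
    sumZeroLoop n 1 result

-- ===== PORT B =====
def sumZero_alt (n : Int) : List Int :=
  let k := PySem.Int.floordiv n 2
  PySem.List.pyRange (-k) 0 1
    ++ (if PySem.Int.mod n 2 ≠ 0 then [(0 : Int)] else [])
    ++ PySem.List.pyRange 1 (k + 1) 1

-- ===== PRECONDITION & SPEC =====
def Spec_sumZero (n : Int) (out : List Int) : Prop := out = sumZero_alt n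
instance (n : Int) (out : List Int) : Decidable (Spec_sumZero n out) := by unfold Spec_sumZero; infer_instance

-- ===== CLAIM (what is proved, stated in full; the proofs are below) =====
def Claim_equal_sumZero : Prop := ∀ (n : Int), Dom_sumZero n → Spec_sumZero n (sumZero n)

-- ===== LEMMAS AND PROOFS =====

-- A's loop, started with n = res.length + 2*m, wraps res in the two symmetric ranges.
lemma sumZeroLoop_eq (m : Nat) : ∀ (s : Int) (res : List Int) (n : Int),
    n = (res.length : Int) + 2 * m →
    sumZeroLoop n s res
      = PySem.List.pyRange (-s - m + 1) (-s + 1) 1 ++ res ++ PySem.List.pyRange s (s + m) 1 := by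
  induction m with
  | zero =>
    intro s res n hn
    rw [sumZeroLoop, if_neg (by push_cast at hn; omega)]
    rw [PySem.List.pyRange_one_eq_nil (by omega), PySem.List.pyRange_one_eq_nil (by omega)]
    simp
  | succ m ih =>
    intro s res n hn
    rw [sumZeroLoop]
    rw [if_pos (by push_cast at hn ⊢; omega)]
    rw [ih (s + 1) (((-1) * s :: res) ++ [s]) n (by simp; push_cast at hn ⊢; omega)]
    push_cast
    rw [show (-(s+1) - (m:Int) + 1) = -s - m by ring,
        show (-(s+1) + 1 : Int) = -s by ring,
        show (-s - ((m:Int) + 1) + 1) = -s - m by ring]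
    rw [PySem.List.pyRange_one_succ_right (a := -s - (m:Int)) (b := -s) (by omega)]
    rw [PySem.List.pyRange_one_cons (a := s) (b := s + ((m:Int) + 1)) (by omega)]
    rw [show (s + ((m:Int) + 1)) = s + 1 + m by ring]
    simp

theorem sumZero_spec : Claim_equal_sumZero := by
  intro n _
  unfold Spec_sumZero
  by_cases h1 : n = 1
  · subst h1; decide
  · simp only [sumZero, sumZero_alt]
    rw [if_neg (by simp [h1])]
    have h2' : PySem.Int.floordiv n 2 = n / 2 := PySem.Int.floordiv_eq_ediv_of_pos (by omega)
    rw [h2']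
    by_cases hneg : n < 0
    · -- negative n: loop body never runs; B's ranges are both empty
      rw [sumZeroLoop, if_neg (by split_ifs <;> simp <;> omega)]
      rw [PySem.List.pyRange_one_eq_nil (by omega), PySem.List.pyRange_one_eq_nil (by omega)]
      simp
    · -- nonnegative n
      have h2 : PySem.Int.mod n 2 = n % 2 := PySem.Int.mod_eq_emod_of_pos (by omega)
      set res : List Int := if PySem.Int.mod n 2 ≠ 0 then [(0:Int)] else [] with hres
      have hlen : (res.length : Int) = if PySem.Int.mod n 2 ≠ 0 then 1 else 0 := by
        rw [hres]; rw [h2]; split_ifs <;> simp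
      have hn : n = (res.length : Int) + 2 * (n / 2).toNat := by
        rw [hlen]; split_ifs with hp <;> omega
      rw [sumZeroLoop_eq (n / 2).toNat 1 res n hn]
      rw [show (-1 - (((n/2).toNat) : Int) + 1) = -(n/2) by omega,
          show ((-1 : Int) + 1) = 0 by ring,
          show ((1 : Int) + ((n/2).toNat : Int)) = n/2 + 1 by omega]
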